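-- pv_equiv track=rewrite | github.com/elfus/proyecto-final-fundamentos | re_notation.py | invert_parenthesis
-- ===== SOURCE A (Python) =====
-- def invert_parenthesis(s):
--     result = ""
--     for c in s:
--         if c == "(":
--             result += ")"
--         elif c == ")":
--             result += "("
--         else:
--             result += c
--     return result
-- ===== SOURCE B (Python) =====
-- def invert_parenthesis(s):
--     # Staged substring passes: split on '(', flip the ')' inside each piece,
--     # then rejoin with ')' (each '(' boundary becomes a ')').
--     return ")".join(part.replace(")", "(") for part in s.split("("))
-- ===== Notes on version B (the rewrite author's own statement) =====
-- stated objective: alternative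
-- what changed: Replaces the per-character branch-and-append loop by staged substring passes: split the string on the open parenthesis, replace each close parenthesis with an open one inside every piece, and rejoin the pieces with a close parenthesis.
import Mathlib
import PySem

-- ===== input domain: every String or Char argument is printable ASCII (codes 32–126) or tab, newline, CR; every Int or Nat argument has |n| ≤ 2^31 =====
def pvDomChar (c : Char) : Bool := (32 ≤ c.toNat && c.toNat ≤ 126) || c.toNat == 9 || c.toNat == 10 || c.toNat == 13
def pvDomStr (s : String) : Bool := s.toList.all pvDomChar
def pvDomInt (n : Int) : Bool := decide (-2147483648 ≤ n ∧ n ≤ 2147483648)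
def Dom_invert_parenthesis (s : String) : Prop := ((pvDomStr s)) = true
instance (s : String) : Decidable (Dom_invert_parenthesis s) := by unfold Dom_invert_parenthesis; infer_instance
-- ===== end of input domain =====

-- B replaces A's per-character branch-and-append loop by staged substring passes:
-- split on '(', replace ')' with '(' in each piece, rejoin with ')' — alternative decomposition.


-- ===== PORT A =====
-- A: loop over the characters, appending ")" / "(" / the character itself.
def invert_parenthesis (s : String) : String :=
  s.toList.foldl (fun result c =>
    if c = '(' then result ++ ")"
    else if c = ')' then result ++ "("
    else result ++ String.ofList [c]) ""

-- ===== PORT B =====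
-- B: s.split("(") → per-piece .replace(")", "(") → ")".join(...)
def invert_parenthesis_alt (s : String) : String :=
  String.ofList (PySem.Chars.join [')']
    ((PySem.Chars.splitOn s.toList ['(']).map
      (fun p => PySem.Chars.replace p [')'] ['('])))

-- ===== PRECONDITION & SPEC =====
def Spec_invert_parenthesis (s : String) (out : String) : Prop := out = invert_parenthesis_alt s
instance (s : String) (out : String) : Decidable (Spec_invert_parenthesis s out) := by unfold Spec_invert_parenthesis; infer_instance

-- ===== CLAIM =====
def Claim_equal_invert_parenthesis : Prop := ∀ (s : String), Dom_invert_parenthesis s → Spec_invert_parenthesis s (invert_parenthesis s)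

-- ===== LEMMAS AND PROOFS =====
-- the full character swap (what A computes pointwise)
def pvSwap (c : Char) : Char := if c = '(' then ')' else if c = ')' then '(' else c
-- the partial swap inside a '('-free piece (what replace ")" "(" does pointwise)
def pvR (c : Char) : Char := if c = ')' then '(' else c
-- recursive characterisation of splitOn on the single-char separator '('
def pvSplitRec : List Char → List Char → List (List Char)
  | [], cur => [cur.reverse]
  | c :: rest, cur =>
      if c = '(' then cur.reverse :: pvSplitRec rest []
      else pvSplitRec rest (c :: cur)

theorem pv_replace_go (fuel : Nat) : ∀ (l acc : List Char), l.length ≤ fuel →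
    PySem.Chars.replace.go [')'] ['('] fuel l acc = acc.reverse ++ l.map pvR := by
  induction fuel with
  | zero =>
    intro l acc h
    have : l = [] := List.eq_nil_of_length_eq_zero (Nat.le_zero.mp h)
    subst this; simp [PySem.Chars.replace.go]
  | succ fuel ih =>
    intro l acc h
    cases l with
    | nil => simp [PySem.Chars.replace.go]
    | cons c t =>
      by_cases hc : c = ')'
      · subst hc
        simp only [PySem.Chars.replace.go, List.isPrefixOf, BEq.rfl, Bool.true_and,
          if_true, List.length_cons, List.length_nil, Nat.zero_add,
          List.drop_succ_cons, List.drop_zero, List.reverse_singleton,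
          List.singleton_append]
        rw [ih t ('(' :: acc) (by simpa using Nat.lt_succ_iff.mp (by simpa using h))]
        simp [pvR]
      · have hb : ((')' : Char) == c) = false := by
          simp only [beq_eq_false_iff_ne, ne_eq]; exact fun he => hc he.symm
        simp only [PySem.Chars.replace.go, List.isPrefixOf, hb, Bool.false_and, if_neg Bool.false_ne_true]
        rw [ih t (c :: acc) (by simpa using Nat.lt_succ_iff.mp (by simpa using h))]
        simp [pvR, hc]

theorem pv_replace (p : List Char) :
    PySem.Chars.replace p [')'] ['('] = p.map pvR := by
  have := pv_replace_go p.length p [] le_rfl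
  simpa [PySem.Chars.replace] using this

theorem pv_splitOn_go (fuel : Nat) : ∀ (l cur : List Char) (acc : List (List Char)),
    l.length < fuel →
    PySem.Chars.splitOn.go ['('] fuel l cur acc = acc.reverse ++ pvSplitRec l cur := by
  induction fuel with
  | zero => intro l cur acc h; omega
  | succ fuel ih =>
    intro l cur acc h
    cases l with
    | nil => simp [PySem.Chars.splitOn.go, pvSplitRec]
    | cons c t =>
      by_cases hc : c = '('
      · subst hc
        simp only [PySem.Chars.splitOn.go, List.isPrefixOf, BEq.rfl, Bool.true_and,
          if_true, List.length_singleton, List.drop_one, List.tail_cons]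
        rw [ih t [] (cur.reverse :: acc) (by simpa using Nat.lt_succ_iff.mp (by simpa using h))]
        simp [pvSplitRec]
      · have hb : (('(' : Char) == c) = false := by
          simp only [beq_eq_false_iff_ne, ne_eq]; exact fun he => hc he.symm
        simp only [PySem.Chars.splitOn.go, List.isPrefixOf, hb, Bool.false_and, if_neg Bool.false_ne_true]
        rw [ih t (c :: cur) acc (by simpa using Nat.lt_succ_iff.mp (by simpa using h))]
        simp [pvSplitRec, hc]

theorem pv_splitOn (l : List Char) :
    PySem.Chars.splitOn l ['('] = pvSplitRec l [] := by
  have := pv_splitOn_go (l.length + 1) l [] [] (by omega)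
  simpa [PySem.Chars.splitOn] using this

theorem pvSplitRec_ne_nil (l cur : List Char) : pvSplitRec l cur ≠ [] := by
  induction l generalizing cur with
  | nil => simp [pvSplitRec]
  | cons c t ih =>
    by_cases hc : c = '(' <;> simp [pvSplitRec, hc, ih]

theorem pv_join_split (l : List Char) : ∀ (cur : List Char),
    PySem.Chars.join [')'] ((pvSplitRec l cur).map (List.map pvR))
      = (cur.map pvR).reverse ++ l.map pvSwap := by
  induction l with
  | nil => intro cur; simp [pvSplitRec, PySem.Chars.join_singleton, List.map_reverse]
  | cons c t ih =>
    intro cur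
    by_cases hc : c = '('
    · subst hc
      obtain ⟨q, rest, hq⟩ : ∃ q rest, pvSplitRec t [] = q :: rest := by
        cases hqr : pvSplitRec t [] with
        | nil => exact absurd hqr (pvSplitRec_ne_nil t [])
        | cons q rest => exact ⟨q, rest, rfl⟩
      simp only [pvSplitRec, if_true, List.map_cons, hq]
      rw [PySem.Chars.join_cons_cons,
        show (List.map pvR q :: List.map (List.map pvR) rest)
            = List.map (List.map pvR) (pvSplitRec t []) from by rw [hq, List.map_cons],
        ih []]
      simp [pvSwap, List.map_reverse]
    · simp only [pvSplitRec, if_neg hc, ih (c :: cur)]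
      simp [pvSwap, pvR, hc]

theorem pv_foldl_A (l : List Char) (acc : String) :
    l.foldl (fun result c =>
      if c = '(' then result ++ ")"
      else if c = ')' then result ++ "("
      else result ++ String.ofList [c]) acc
    = acc ++ String.ofList (l.map pvSwap) := by
  induction l generalizing acc with
  | nil => simp
  | cons c l ih =>
    simp only [List.foldl_cons, List.map_cons, ih]
    rw [show pvSwap c :: l.map pvSwap = [pvSwap c] ++ l.map pvSwap from rfl,
      String.ofList_append, ← String.append_assoc]
    by_cases h1 : c = '('
    · subst h1; rw [if_pos rfl]; rfl
    · by_cases h2 : c = ')'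
      · subst h2; rw [if_neg h1, if_pos rfl]; rfl
      · rw [if_neg h1, if_neg h2]
        simp [pvSwap, h1, h2]

-- ===== VERDICT =====
theorem invert_parenthesis_spec : Claim_equal_invert_parenthesis := by
  intro s _
  show _ = _
  unfold invert_parenthesis invert_parenthesis_alt
  rw [pv_foldl_A, pv_splitOn]
  have : (pvSplitRec s.toList []).map (fun p => PySem.Chars.replace p [')'] ['(']) =
      (pvSplitRec s.toList []).map (List.map pvR) := by
    apply List.map_congr_left; intro p _; exact pv_replace p
  rw [this, pv_join_split s.toList []]
  simp
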